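-- pv_equiv track=rewrite | github.com/sauravbhattacharya001/VoronoiMap | vormap_lowpoly.py | _average_colours
-- ===== SOURCE A (Python) =====
-- from typing import Dict, List, Optional, Tuple
--
-- def _average_colours(pixels: List[Tuple[int, int, int]],
--                      cell_map: List[int],
--                      num_cells: int) -> List[Tuple[int, int, int]]:
--     """Compute average colour per cell."""
--     sums_r = [0] * num_cells
--     sums_g = [0] * num_cells
--     sums_b = [0] * num_cells
--     counts = [0] * num_cells
--
--     for i, cell in enumerate(cell_map):
--         r, g, b = pixels[i]
--         sums_r[cell] += r
--         sums_g[cell] += g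
--         sums_b[cell] += b
--         counts[cell] += 1
--
--     colours = []
--     for i in range(num_cells):
--         if counts[i] > 0:
--             colours.append((
--                 sums_r[i] // counts[i],
--                 sums_g[i] // counts[i],
--                 sums_b[i] // counts[i],
--             ))
--         else:
--             colours.append((128, 128, 128))
--
--     return colours
-- ===== SOURCE B (Python) =====
-- from typing import Dict, List, Optional, Tuple
--
-- def _average_colours(pixels: List[Tuple[int, int, int]],
--                      cell_map: List[int],
--                      num_cells: int) -> List[Tuple[int, int, int]]:
--     """Compute average colour per cell by grouping pixels into per-cell buckets."""
--     buckets = [[] for _ in range(num_cells)]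
--     for px, cell in zip(pixels, cell_map):
--         buckets[cell].append(px)
--     colours = []
--     for bucket in buckets:
--         if bucket:
--             n = len(bucket)
--             sr = sum(p[0] for p in bucket)
--             sg = sum(p[1] for p in bucket)
--             sb = sum(p[2] for p in bucket)
--             colours.append((sr // n, sg // n, sb // n))
--         else:
--             colours.append((128, 128, 128))
--     return colours
-- ===== Notes on version B (the rewrite author's own statement) =====
-- stated objective: alternative
-- what changed: B groups whole pixel tuples into per-cell bucket lists in one zip pass and computes each cell's average from its bucket, instead of maintaining four parallel scalar sum/count arrays indexed by cell.
import Mathlib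
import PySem

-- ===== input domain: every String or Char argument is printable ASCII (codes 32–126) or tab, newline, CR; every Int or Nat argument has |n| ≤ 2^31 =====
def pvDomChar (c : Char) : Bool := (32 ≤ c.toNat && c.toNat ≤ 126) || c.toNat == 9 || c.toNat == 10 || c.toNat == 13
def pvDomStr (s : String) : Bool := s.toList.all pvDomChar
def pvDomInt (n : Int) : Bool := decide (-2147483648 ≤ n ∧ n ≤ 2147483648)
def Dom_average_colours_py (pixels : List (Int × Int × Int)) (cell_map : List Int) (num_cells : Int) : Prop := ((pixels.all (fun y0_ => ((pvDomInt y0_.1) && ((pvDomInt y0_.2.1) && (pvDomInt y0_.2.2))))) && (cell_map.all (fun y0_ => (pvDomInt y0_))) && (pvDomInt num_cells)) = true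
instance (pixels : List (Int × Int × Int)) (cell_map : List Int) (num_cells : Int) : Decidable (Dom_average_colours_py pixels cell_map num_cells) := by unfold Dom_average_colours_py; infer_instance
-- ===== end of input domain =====

-- B groups whole pixel tuples into per-cell buckets and averages each bucket, instead of A's four
-- parallel scalar sum/count arrays (alternative decomposition, same asymptotic cost).


-- ===== PORT A =====
def average_colours_py (pixels : List (Int × Int × Int)) (cell_map : List Int) (num_cells : Int) : List (Int × Int × Int) :=
  let sums_r := List.replicate num_cells.toNat (0 : Int)
  let sums_g := List.replicate num_cells.toNat (0 : Int)
  let sums_b := List.replicate num_cells.toNat (0 : Int)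
  let counts := List.replicate num_cells.toNat (0 : Int)
  let st := (PySem.List.enumerate cell_map 0).foldl
    (fun (s : List Int × List Int × List Int × List Int) ic =>
      let p := PySem.List.pyGetD pixels ic.1 (0, 0, 0)
      (PySem.List.pySetD s.1 ic.2 (PySem.List.pyGetD s.1 ic.2 0 + p.1),
       PySem.List.pySetD s.2.1 ic.2 (PySem.List.pyGetD s.2.1 ic.2 0 + p.2.1),
       PySem.List.pySetD s.2.2.1 ic.2 (PySem.List.pyGetD s.2.2.1 ic.2 0 + p.2.2),
       PySem.List.pySetD s.2.2.2 ic.2 (PySem.List.pyGetD s.2.2.2 ic.2 0 + 1)))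
    (sums_r, sums_g, sums_b, counts)
  (PySem.List.pyRange 0 num_cells 1).map (fun i =>
    if PySem.List.pyGetD st.2.2.2 i 0 > 0 then
      (PySem.Int.floordiv (PySem.List.pyGetD st.1 i 0) (PySem.List.pyGetD st.2.2.2 i 0),
       PySem.Int.floordiv (PySem.List.pyGetD st.2.1 i 0) (PySem.List.pyGetD st.2.2.2 i 0),
       PySem.Int.floordiv (PySem.List.pyGetD st.2.2.1 i 0) (PySem.List.pyGetD st.2.2.2 i 0))
    else (128, 128, 128))

-- ===== PORT B =====
def average_colours_py_alt (pixels : List (Int × Int × Int)) (cell_map : List Int) (num_cells : Int) : List (Int × Int × Int) :=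
  let buckets := (pixels.zip cell_map).foldl
    (fun bks pc => PySem.List.pySetD bks pc.2 (PySem.List.pyGetD bks pc.2 [] ++ [pc.1]))
    (List.replicate num_cells.toNat ([] : List (Int × Int × Int)))
  buckets.map (fun bucket =>
    if bucket ≠ [] then
      ((PySem.Int.floordiv ((bucket.map (·.1)).sum) (bucket.length : Int)),
       (PySem.Int.floordiv ((bucket.map (·.2.1)).sum) (bucket.length : Int)),
       (PySem.Int.floordiv ((bucket.map (·.2.2)).sum) (bucket.length : Int)))
    else (128, 128, 128))

-- ===== PRECONDITION & SPEC =====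
-- Pre_ admits exactly the inputs on which A returns normally: enough pixels for cell_map, and
-- every cell index in Python's valid (possibly negative, wrapping) range [-num_cells, num_cells).
def Pre_average_colours_py (pixels : List (Int × Int × Int)) (cell_map : List Int) (num_cells : Int) : Prop :=
  cell_map.length ≤ pixels.length ∧ ∀ c ∈ cell_map, -num_cells ≤ c ∧ c < num_cells
instance (pixels : List (Int × Int × Int)) (cell_map : List Int) (num_cells : Int) : Decidable (Pre_average_colours_py pixels cell_map num_cells) := by unfold Pre_average_colours_py; infer_instance

def pvWitness_average_colours_py : (List (Int × Int × Int)) × List Int × Int :=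
  ([(10, 20, 30), (20, 40, 61), (0, 0, 0)], [0, 0, -1], 2)

def Spec_average_colours_py (pixels : List (Int × Int × Int)) (cell_map : List Int) (num_cells : Int) (out : List (Int × Int × Int)) : Prop := out = average_colours_py_alt pixels cell_map num_cells
instance (pixels : List (Int × Int × Int)) (cell_map : List Int) (num_cells : Int) (out : List (Int × Int × Int)) : Decidable (Spec_average_colours_py pixels cell_map num_cells out) := by unfold Spec_average_colours_py; infer_instance

-- ===== CLAIM (what is proved, stated in full; the proofs are below) =====
def Claim_equal_average_colours_py : Prop := ∀ (pixels : List (Int × Int × Int)) (cell_map : List Int) (num_cells : Int), Dom_average_colours_py pixels cell_map num_cells → Pre_average_colours_py pixels cell_map num_cells → Spec_average_colours_py pixels cell_map num_cells (average_colours_py pixels cell_map num_cells)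

-- ===== LEMMAS AND PROOFS =====

-- effective (wrapped) index of a Python list access in range
def pvEff (len : Nat) (c : Int) : Nat := if 0 ≤ c then c.toNat else len - (-c).toNat

theorem pvIdx_eff (len : Nat) (c : Int) (h1 : -(len : Int) ≤ c) (h2 : c < (len : Int)) : PySem.List.pyIdx? len c = some (pvEff len c) := by
  simp only [PySem.List.pyIdx?, pvEff]
  split_ifs <;> simp_all

theorem pvSetD_eff {α : Type} (xs : List α) (c : Int) (v : α) (h1 : -(xs.length : Int) ≤ c) (h2 : c < (xs.length : Int)) : PySem.List.pySetD xs c v = xs.set (pvEff xs.length c) v := by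
  simp only [PySem.List.pySetD, PySem.List.pySet?, pvIdx_eff _ _ h1 h2, Option.map_some, Option.getD_some]

theorem pvGetD_eff {α : Type} (xs : List α) (c : Int) (d : α) (h1 : -(xs.length : Int) ≤ c) (h2 : c < (xs.length : Int)) : PySem.List.pyGetD xs c d = xs.getD (pvEff xs.length c) d := by
  simp only [PySem.List.pyGetD, PySem.List.pyGet?, pvIdx_eff _ _ h1 h2, Option.bind_some]
  rfl


-- A's state-update step, rephrased over (pixel, cell) pairs
def pvStepA (s : List Int × List Int × List Int × List Int) (pc : (Int × Int × Int) × Int) : List Int × List Int × List Int × List Int :=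
  (PySem.List.pySetD s.1 pc.2 (PySem.List.pyGetD s.1 pc.2 0 + pc.1.1),
   PySem.List.pySetD s.2.1 pc.2 (PySem.List.pyGetD s.2.1 pc.2 0 + pc.1.2.1),
   PySem.List.pySetD s.2.2.1 pc.2 (PySem.List.pyGetD s.2.2.1 pc.2 0 + pc.1.2.2),
   PySem.List.pySetD s.2.2.2 pc.2 (PySem.List.pyGetD s.2.2.2 pc.2 0 + 1))

def pvStepB (bks : List (List (Int × Int × Int))) (pc : (Int × Int × Int) × Int) : List (List (Int × Int × Int)) :=
  PySem.List.pySetD bks pc.2 (PySem.List.pyGetD bks pc.2 [] ++ [pc.1])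

-- A's enumerate-and-index loop equals the fold of pvStepA over the zipped list
theorem pvEnumFold : ∀ (cm : List Int) (k : Nat) (px : List (Int × Int × Int)) (st : List Int × List Int × List Int × List Int),
    k + cm.length ≤ px.length →
    (PySem.List.enumerate cm (k : Int)).foldl
      (fun s ic =>
        let p := PySem.List.pyGetD px ic.1 (0, 0, 0)
        (PySem.List.pySetD s.1 ic.2 (PySem.List.pyGetD s.1 ic.2 0 + p.1),
         PySem.List.pySetD s.2.1 ic.2 (PySem.List.pyGetD s.2.1 ic.2 0 + p.2.1),
         PySem.List.pySetD s.2.2.1 ic.2 (PySem.List.pyGetD s.2.2.1 ic.2 0 + p.2.2),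
         PySem.List.pySetD s.2.2.2 ic.2 (PySem.List.pyGetD s.2.2.2 ic.2 0 + 1))) st
      = ((px.drop k).zip cm).foldl pvStepA st := by
  intro cm
  induction cm with
  | nil => intro k px st h; simp [PySem.List.enumerate_nil]
  | cons c cs ih =>
    intro k px st h
    simp only [List.length_cons] at h
    have hk : k < px.length := by omega
    rw [PySem.List.enumerate_cons, List.drop_eq_getElem_cons hk]
    simp only [List.zip_cons_cons, List.foldl_cons]
    have hcast : (k : Int) + 1 = ((k + 1 : Nat) : Int) := by push_cast; ring
    rw [hcast, ih (k + 1) px _ (by omega)]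
    congr 1
    simp only [pvStepA, PySem.List.pyGetD_natCast, List.getD_eq_getElem _ _ hk]

-- the invariant: A's four arrays are the componentwise sums / lengths of B's buckets
def pvInv (n : Nat) (s : List Int × List Int × List Int × List Int) (bks : List (List (Int × Int × Int))) : Prop :=
  s.1.length = n ∧ s.2.1.length = n ∧ s.2.2.1.length = n ∧ s.2.2.2.length = n ∧ bks.length = n ∧
  ∀ j, j < n →
    s.1.getD j 0 = ((bks.getD j []).map (·.1)).sum ∧
    s.2.1.getD j 0 = ((bks.getD j []).map (·.2.1)).sum ∧
    s.2.2.1.getD j 0 = ((bks.getD j []).map (·.2.2)).sum ∧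
    s.2.2.2.getD j 0 = ((bks.getD j []).length : Int)

theorem pvGetD_set_eq {α : Type} (xs : List α) (e : Nat) (v d : α) (he : e < xs.length) :
    (xs.set e v).getD e d = v := by
  simp [List.getD, he]

theorem pvGetD_set_ne {α : Type} (xs : List α) (e j : Nat) (v d : α) (hne : j ≠ e) :
    (xs.set e v).getD j d = xs.getD j d := by
  simp [List.getD, Ne.symm hne]

theorem pvStep_inv (n : Nat) (s : List Int × List Int × List Int × List Int)
    (bks : List (List (Int × Int × Int))) (pc : (Int × Int × Int) × Int)
    (hinv : pvInv n s bks) (hb : -(n : Int) ≤ pc.2 ∧ pc.2 < (n : Int)) :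
    pvInv n (pvStepA s pc) (pvStepB bks pc) := by
  obtain ⟨h1, h2, h3, h4, h5, hrel⟩ := hinv
  obtain ⟨hb1, hb2⟩ := hb
  have he : pvEff n pc.2 < n := by unfold pvEff; split_ifs <;> omega
  set e := pvEff n pc.2 with hedef
  have hs1 : ∀ v, PySem.List.pySetD s.1 pc.2 v = s.1.set e v := by
    intro v; rw [pvSetD_eff s.1 pc.2 v (by rw [h1]; exact hb1) (by rw [h1]; exact hb2), h1]
  have hs2 : ∀ v, PySem.List.pySetD s.2.1 pc.2 v = s.2.1.set e v := by
    intro v; rw [pvSetD_eff s.2.1 pc.2 v (by rw [h2]; exact hb1) (by rw [h2]; exact hb2), h2]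
  have hs3 : ∀ v, PySem.List.pySetD s.2.2.1 pc.2 v = s.2.2.1.set e v := by
    intro v; rw [pvSetD_eff s.2.2.1 pc.2 v (by rw [h3]; exact hb1) (by rw [h3]; exact hb2), h3]
  have hs4 : ∀ v, PySem.List.pySetD s.2.2.2 pc.2 v = s.2.2.2.set e v := by
    intro v; rw [pvSetD_eff s.2.2.2 pc.2 v (by rw [h4]; exact hb1) (by rw [h4]; exact hb2), h4]
  have hs5 : ∀ v, PySem.List.pySetD bks pc.2 v = bks.set e v := by
    intro v; rw [pvSetD_eff bks pc.2 v (by rw [h5]; exact hb1) (by rw [h5]; exact hb2), h5]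
  have hg1 : PySem.List.pyGetD s.1 pc.2 0 = s.1.getD e 0 := by
    rw [pvGetD_eff s.1 pc.2 0 (by rw [h1]; exact hb1) (by rw [h1]; exact hb2), h1]
  have hg2 : PySem.List.pyGetD s.2.1 pc.2 0 = s.2.1.getD e 0 := by
    rw [pvGetD_eff s.2.1 pc.2 0 (by rw [h2]; exact hb1) (by rw [h2]; exact hb2), h2]
  have hg3 : PySem.List.pyGetD s.2.2.1 pc.2 0 = s.2.2.1.getD e 0 := by
    rw [pvGetD_eff s.2.2.1 pc.2 0 (by rw [h3]; exact hb1) (by rw [h3]; exact hb2), h3]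
  have hg4 : PySem.List.pyGetD s.2.2.2 pc.2 0 = s.2.2.2.getD e 0 := by
    rw [pvGetD_eff s.2.2.2 pc.2 0 (by rw [h4]; exact hb1) (by rw [h4]; exact hb2), h4]
  have hg5 : PySem.List.pyGetD bks pc.2 [] = bks.getD e [] := by
    rw [pvGetD_eff bks pc.2 [] (by rw [h5]; exact hb1) (by rw [h5]; exact hb2), h5]
  refine ⟨?_, ?_, ?_, ?_, ?_, ?_⟩
  · simp only [pvStepA, hs1]; simp [h1]
  · simp only [pvStepA, hs2]; simp [h2]
  · simp only [pvStepA, hs3]; simp [h3]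
  · simp only [pvStepA, hs4]; simp [h4]
  · simp only [pvStepB, hs5]; simp [h5]
  · intro j hj
    obtain ⟨re1, re2, re3, re4⟩ := hrel e he
    simp only [pvStepA, pvStepB, hs1, hs2, hs3, hs4, hs5, hg1, hg2, hg3, hg4, hg5]
    by_cases hje : j = e
    · subst hje
      rw [pvGetD_set_eq _ _ _ _ (by omega), pvGetD_set_eq _ _ _ _ (by omega),
          pvGetD_set_eq _ _ _ _ (by omega), pvGetD_set_eq _ _ _ _ (by omega),
          pvGetD_set_eq _ _ _ _ (by omega), re1, re2, re3, re4]
      refine ⟨by simp, by simp, by simp, ?_⟩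
      simp only [List.length_append, List.length_cons, List.length_nil]
      push_cast; ring
    · obtain ⟨r1, r2, r3, r4⟩ := hrel j hj
      rw [pvGetD_set_ne _ _ _ _ _ hje, pvGetD_set_ne _ _ _ _ _ hje,
          pvGetD_set_ne _ _ _ _ _ hje, pvGetD_set_ne _ _ _ _ _ hje,
          pvGetD_set_ne _ _ _ _ _ hje]
      exact ⟨r1, r2, r3, r4⟩

theorem pvFold_inv (zs : List ((Int × Int × Int) × Int)) : ∀ (n : Nat)
    (s : List Int × List Int × List Int × List Int) (bks : List (List (Int × Int × Int))),
    pvInv n s bks → (∀ pc ∈ zs, -(n : Int) ≤ pc.2 ∧ pc.2 < (n : Int)) →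
    pvInv n (zs.foldl pvStepA s) (zs.foldl pvStepB bks) := by
  induction zs with
  | nil => intro n s bks h _; simpa using h
  | cons pc zs ih =>
    intro n s bks h hb
    simp only [List.foldl_cons]
    exact ih n _ _ (pvStep_inv n s bks pc h (hb pc (by simp))) (fun q hq => hb q (by simp [hq]))

theorem pvInv_init (n : Nat) :
    pvInv n (List.replicate n (0 : Int), List.replicate n (0 : Int), List.replicate n (0 : Int), List.replicate n (0 : Int))
      (List.replicate n ([] : List (Int × Int × Int))) := by
  refine ⟨by simp, by simp, by simp, by simp, by simp, ?_⟩
  intro j hj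
  simp [List.getD, hj]

theorem average_colours_py_spec : Claim_equal_average_colours_py := by
  intro pixels cell_map num_cells _ hpre
  obtain ⟨hlen, hcells⟩ := hpre
  simp only [Spec_average_colours_py, average_colours_py, average_colours_py_alt]
  have hbnd : ∀ pc ∈ pixels.zip cell_map, -((num_cells.toNat : Nat) : Int) ≤ pc.2 ∧ pc.2 < ((num_cells.toNat : Nat) : Int) := by
    intro pc hpc
    have hc := hcells pc.2 (List.of_mem_zip hpc).2
    omega
  have hfold := pvEnumFold cell_map 0 pixels
    (List.replicate num_cells.toNat 0, List.replicate num_cells.toNat 0,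
     List.replicate num_cells.toNat 0, List.replicate num_cells.toNat 0) (by omega)
  simp only [List.drop_zero, Nat.cast_zero] at hfold
  rw [hfold]
  rw [show (fun (bks : List (List (Int × Int × Int))) (pc : (Int × Int × Int) × Int) =>
        PySem.List.pySetD bks pc.2 (PySem.List.pyGetD bks pc.2 [] ++ [pc.1])) = pvStepB from rfl]
  have hinv := pvFold_inv (pixels.zip cell_map) num_cells.toNat
    (List.replicate num_cells.toNat 0, List.replicate num_cells.toNat 0,
     List.replicate num_cells.toNat 0, List.replicate num_cells.toNat 0)
    (List.replicate num_cells.toNat ([] : List (Int × Int × Int)))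
    (pvInv_init num_cells.toNat) hbnd
  obtain ⟨l1, l2, l3, l4, l5, hrel⟩ := hinv
  set sA := (pixels.zip cell_map).foldl pvStepA
    (List.replicate num_cells.toNat 0, List.replicate num_cells.toNat 0,
     List.replicate num_cells.toNat 0, List.replicate num_cells.toNat 0) with hsA
  set bksF := (pixels.zip cell_map).foldl pvStepB
    (List.replicate num_cells.toNat ([] : List (Int × Int × Int))) with hbks
  apply List.ext_getElem
  · simp [PySem.List.length_pyRange_one]
    omega
  · intro k hk1 hk2
    have hkn : k < num_cells.toNat := by
      simpa [PySem.List.length_pyRange_one] using hk1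
    simp only [List.getElem_map, PySem.List.getElem_pyRange_one, zero_add]
    obtain ⟨r1, r2, r3, r4⟩ := hrel k hkn
    have g1 : PySem.List.pyGetD sA.1 (k : Int) 0 = sA.1.getD k 0 := by
      simp [PySem.List.pyGetD_natCast]
    have g2 : PySem.List.pyGetD sA.2.1 (k : Int) 0 = sA.2.1.getD k 0 := by
      simp [PySem.List.pyGetD_natCast]
    have g3 : PySem.List.pyGetD sA.2.2.1 (k : Int) 0 = sA.2.2.1.getD k 0 := by
      simp [PySem.List.pyGetD_natCast]
    have g4 : PySem.List.pyGetD sA.2.2.2 (k : Int) 0 = sA.2.2.2.getD k 0 := by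
      simp [PySem.List.pyGetD_natCast]
    have hbk : bksF[k] = bksF.getD k [] := by
      rw [List.getD_eq_getElem _ _ (by omega)]
    rw [g1, g2, g3, g4, r1, r2, r3, r4, ← hbk]
    by_cases hnil : bksF[k] = []
    · simp [hnil]
    · have hpos : (0 : Int) < (bksF[k].length : Int) := by
        have := List.length_pos_of_ne_nil hnil
        omega
      simp [hnil]
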